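-- pv_equiv track=rewrite | github.com/nzt-wrk/Module_2 | PracticHard_Module_2.py | Password_num
-- ===== SOURCE A (Python) =====
-- def Password_num(n):  # функция получения пароля из исходного(введеного) числа
--     result = ""
--     cnt = 0
--
--     for i in range(1, n):
--         if n > 20:
--             break
--         else:
--             for j in range(i + 1, n):
--                 cnt += 1  # Счетчик переборов по циклам (не обязателен для работы программы)
--                 if n % (i + j) == 0:
--                     result = result + str(i) + str(j)
--     return result, cnt
-- ===== SOURCE B (Python) =====
-- def Password_num(n):
--     if n < 2 or n > 20:
--         return "", 0
--     divisors = [s for s in range(1, 2 * n) if n % s == 0]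
--     result = "".join(str(i) + str(s - i)
--                      for i in range(1, n)
--                      for s in divisors
--                      if i < s - i < n)
--     return result, (n - 1) * (n - 2) // 2
-- ===== Notes on version B (the rewrite author's own statement) =====
-- stated objective: simpler
-- what changed: B guards n outside [2,20] up front, precomputes the divisor list of n once and emits qualifying pair strings per i from it instead of testing n % (i+j) in a nested scan, and replaces the incidental pair counter with the closed form (n-1)(n-2)//2.
import Mathlib
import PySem

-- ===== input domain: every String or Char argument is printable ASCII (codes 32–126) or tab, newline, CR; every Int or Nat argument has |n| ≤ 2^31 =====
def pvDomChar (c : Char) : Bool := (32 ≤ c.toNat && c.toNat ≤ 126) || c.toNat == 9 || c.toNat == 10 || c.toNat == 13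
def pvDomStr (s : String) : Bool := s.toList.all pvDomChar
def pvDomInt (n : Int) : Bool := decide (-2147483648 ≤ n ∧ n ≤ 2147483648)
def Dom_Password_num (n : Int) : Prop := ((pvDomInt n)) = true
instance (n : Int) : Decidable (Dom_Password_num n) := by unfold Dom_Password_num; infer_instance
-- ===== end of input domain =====

set_option maxRecDepth 8192


-- B guards n outside [2,20] up front, builds the divisor list of n once, emits the pair strings
-- from the divisor list per i, and replaces the pair counter by the closed form (n-1)(n-2)//2
-- (objective: simpler; not measurably faster since A caps n at 20).

-- ===== PORT A =====
-- inner 'for j' loop: fold over range(i+1, n) updating (result, cnt)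
def pvA_inner (n i : Int) (st : String × Int) : String × Int :=
  (PySem.List.pyRange (i + 1) n 1).foldl
    (fun (st2 : String × Int) (j : Int) =>
      let (r, c) := st2
      let c := c + 1
      if PySem.Int.mod n (i + j) == 0 then
        (r ++ PySem.Int.toStr i ++ PySem.Int.toStr j, c)
      else (r, c))
    st

-- outer 'for i' loop with 'break': recursion on the remaining iteration count (n - i)
def pvA_outer (n : Int) : Nat → Int → String × Int → String × Int
  | 0, _, st => st
  | fuel + 1, i, st =>
    if n > 20 then st
    else pvA_outer n fuel (i + 1) (pvA_inner n i st)

def Password_num (n : Int) : String × Int :=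
  pvA_outer n (n - 1).toNat 1 ("", 0)

-- ===== PORT B =====
def Password_num_alt (n : Int) : String × Int :=
  if n < 2 ∨ n > 20 then ("", 0)
  else
    let divisors := (PySem.List.pyRange 1 (2 * n) 1).filter (fun s => PySem.Int.mod n s == 0)
    let result := String.join ((PySem.List.pyRange 1 n 1).map (fun i =>
      String.join ((divisors.filter (fun s => i < s - i ∧ s - i < n)).map (fun s =>
        PySem.Int.toStr i ++ PySem.Int.toStr (s - i)))))
    (result, PySem.Int.floordiv ((n - 1) * (n - 2)) 2)

-- ===== PRECONDITION & SPEC =====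
def Spec_Password_num (n : Int) (out : String × Int) : Prop := out = Password_num_alt n
instance (n : Int) (out : String × Int) : Decidable (Spec_Password_num n out) := by unfold Spec_Password_num; infer_instance

-- ===== CLAIM (what is proved, stated in full; the proofs are below) =====
def Claim_equal_Password_num : Prop := ∀ (n : Int), Dom_Password_num n → Spec_Password_num n (Password_num n)

-- ===== LEMMAS AND PROOFS =====

-- ===== VERDICT (by name: the statement is the Claim_ definition above) =====
theorem Password_num_spec : Claim_equal_Password_num := by
  intro n hdom
  unfold Spec_Password_num
  by_cases h1 : n < 2
  · -- no iterations: fuel (n-1).toNat = 0; B's guard fires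
    simp [Password_num, show (n - 1).toNat = 0 by omega, pvA_outer, Password_num_alt, h1]
  · by_cases h2 : n > 20
    · -- A breaks on the first iteration; B's guard fires
      obtain ⟨k, hk⟩ : ∃ k, (n - 1).toNat = k + 1 :=
        ⟨(n - 1).toNat - 1, by omega⟩
      rw [Password_num, hk, pvA_outer, if_pos h2]
      simp [Password_num_alt, h2]
    · -- 2 ≤ n ≤ 20: finitely many cases, evaluate both sides
      have hlo : (2:Int) ≤ n := by omega
      have hhi : n ≤ 20 := by omega
      interval_cases n <;> decide
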